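-- pv_equiv track=rewrite | github.com/jankin3/project-leetcode | 224-basic-calculator.py | find_all_num
-- ===== SOURCE A (Python) =====
-- def find_all_num(s, i):
--     '连接所有的数字部分组成数'
--     num = int(s[i])
--     while True:
--         if i + 1 < len(s) and s[i + 1].isdigit():
--             num = num * 10 + int(s[i + 1])
--             i += 1
--         else:
--             break
--     return num, i
-- ===== SOURCE B (Python) =====
-- def find_all_num(s, i):
--     # Scan to the last index j of the digit run first, then build the value
--     # back-to-front with positional weights (no arithmetic during the scan).
--     j = i
--     while j + 1 < len(s) and s[j + 1].isdigit():
--         j += 1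
--     num, p = 0, 1
--     for k in range(j, i - 1, -1):
--         num += (ord(s[k]) - 48) * p
--         p *= 10
--     return num, j
-- ===== Notes on version B (the rewrite author's own statement) =====
-- stated objective: alternative
-- what changed: A fuses scanning and value-building in one while loop with Horner accumulation (num*10+digit); B first does a pure boundary scan to find the end j of the digit run, then builds the value in a separate back-to-front pass with positional weights (digit*10^k).
import Mathlib
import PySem

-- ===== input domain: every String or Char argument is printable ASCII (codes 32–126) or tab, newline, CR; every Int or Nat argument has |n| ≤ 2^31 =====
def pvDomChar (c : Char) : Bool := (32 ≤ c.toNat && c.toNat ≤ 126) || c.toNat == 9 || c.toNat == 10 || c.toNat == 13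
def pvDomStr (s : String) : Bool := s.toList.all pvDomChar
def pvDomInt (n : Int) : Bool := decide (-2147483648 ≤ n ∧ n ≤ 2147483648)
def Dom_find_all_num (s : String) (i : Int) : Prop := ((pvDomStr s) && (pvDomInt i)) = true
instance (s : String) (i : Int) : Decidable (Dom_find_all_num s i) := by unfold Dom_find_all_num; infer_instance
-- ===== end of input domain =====

-- B separates the work A's single interleaved loop does: first a pure boundary scan to the
-- end of the digit run, then the value is built back-to-front with positional weights
-- (objective: alternative decomposition, same cost).

-- int(c) for a single char / ord(c) - 48: exact for ASCII digit chars, which is all the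
-- guards / Pre_ ever let through.
def pvDigit (cs : List Char) (k : Int) : Int := ((PySem.List.pyGetD cs k '0').toNat : Int) - 48

-- ===== PORT A =====
-- the 'while True' loop: one fused pass, Horner accumulation num*10 + digit at each step.
-- Fuel 2*len+1 bounds the ≤ (len-1) - i ≤ 2*len iterations (Pre_ gives -len ≤ i).
def findAllNumLoopA (cs : List Char) : Nat → Int → Int → Int × Int
  | 0, num, i => (num, i)
  | fuel+1, num, i =>
    match PySem.List.pyGet? cs (i+1) with
    | some c =>
      if i + 1 < (cs.length : Int) ∧ PySem.Chars.isdigit c = true then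
        findAllNumLoopA cs fuel (num * 10 + pvDigit cs (i+1)) (i+1)
      else (num, i)
    | none => (num, i)

def find_all_num (s : String) (i : Int) : Int × Int :=
  let cs := s.toList
  findAllNumLoopA cs (2 * cs.length + 1) (pvDigit cs i) i

-- ===== PORT B =====
-- boundary scan: advance j while s[j+1] is a digit, no arithmetic.
def findAllNumEnd (cs : List Char) : Nat → Int → Int
  | 0, j => j
  | fuel+1, j =>
    match PySem.List.pyGet? cs (j+1) with
    | some c =>
      if j + 1 < (cs.length : Int) ∧ PySem.Chars.isdigit c = true then
        findAllNumEnd cs fuel (j+1)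
      else j
    | none => j

def find_all_num_alt (s : String) (i : Int) : Int × Int :=
  let cs := s.toList
  let j := findAllNumEnd cs (2 * cs.length + 1) i
  let r := (PySem.List.pyRange j (i-1) (-1)).foldl
      (fun (st : Int × Int) k => (st.1 + pvDigit cs k * st.2, st.2 * 10)) (0, 1)
  (r.1, j)

-- ===== PRECONDITION & SPEC =====
-- Pre_: exactly where Python A returns — s[i] must exist (IndexError otherwise) and be a
-- digit (int(s[i]) raises ValueError otherwise).
def Pre_find_all_num (s : String) (i : Int) : Prop :=
  PySem.Raise.InRange s.toList.length i ∧
  PySem.Chars.isdigit (PySem.List.pyGetD s.toList i '0') = true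
instance (s : String) (i : Int) : Decidable (Pre_find_all_num s i) := by
  unfold Pre_find_all_num; infer_instance

def pvWitness_find_all_num : String × Int := ("12a", 0)

def Spec_find_all_num (s : String) (i : Int) (out : Int × Int) : Prop := out = find_all_num_alt s i
instance (s : String) (i : Int) (out : Int × Int) : Decidable (Spec_find_all_num s i out) := by
  unfold Spec_find_all_num; infer_instance

-- ===== CLAIM (what is proved, stated in full; the proofs are below) =====
def Claim_equal_find_all_num : Prop := ∀ (s : String) (i : Int), Dom_find_all_num s i → Pre_find_all_num s i → Spec_find_all_num s i (find_all_num s i)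

-- ===== LEMMAS AND PROOFS =====

-- positional value of a (little-endian-traversed) index list
def pvWsum (cs : List Char) : List Int → Int
  | [] => 0
  | k :: t => pvDigit cs k + 10 * pvWsum cs t

lemma findAllNumEnd_ge (cs : List Char) : ∀ (f : Nat) (i : Int), i ≤ findAllNumEnd cs f i := by
  intro f
  induction f with
  | zero => intro i; simp [findAllNumEnd]
  | succ f ih =>
    intro i
    simp only [findAllNumEnd]
    cases h : PySem.List.pyGet? cs (i+1) with
    | none => simp
    | some c =>
      by_cases hg : i + 1 < (cs.length : Int) ∧ PySem.Chars.isdigit c = true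
      · simp only [if_pos hg]; have := ih (i+1); omega
      · simp only [if_neg hg]; omega

-- A's fused loop = Horner fold over the indices B's boundary scan delimits
lemma loopA_eq (cs : List Char) : ∀ (f : Nat) (i num : Int),
    findAllNumLoopA cs f num i =
      ((PySem.List.pyRange (i+1) (findAllNumEnd cs f i + 1) 1).foldl
          (fun a k => a * 10 + pvDigit cs k) num,
        findAllNumEnd cs f i) := by
  intro f
  induction f with
  | zero =>
    intro i num
    simp [findAllNumLoopA, findAllNumEnd, PySem.List.pyRange_one_eq_nil (by omega : i + 1 ≤ i + 1)]
  | succ f ih =>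
    intro i num
    simp only [findAllNumLoopA, findAllNumEnd]
    cases h : PySem.List.pyGet? cs (i+1) with
    | none =>
      simp [PySem.List.pyRange_one_eq_nil (by omega : i + 1 ≤ i + 1)]
    | some c =>
      by_cases hg : i + 1 < (cs.length : Int) ∧ PySem.Chars.isdigit c = true
      · simp only [if_pos hg]
        rw [ih (i+1) (num * 10 + pvDigit cs (i+1))]
        have hle : i + 1 ≤ findAllNumEnd cs f (i + 1) := findAllNumEnd_ge cs f (i+1)
        rw [PySem.List.pyRange_one_cons (by omega : i + 1 < findAllNumEnd cs f (i+1) + 1)]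
        simp [List.foldl_cons]
      · simp [if_neg hg, PySem.List.pyRange_one_eq_nil (by omega : i + 1 ≤ i + 1)]

-- B's fold with running power p = positional sum
lemma foldB_eq (cs : List Char) : ∀ (ks : List Int) (num p : Int),
    ks.foldl (fun (st : Int × Int) k => (st.1 + pvDigit cs k * st.2, st.2 * 10)) (num, p) =
      (num + p * pvWsum cs ks, p * 10 ^ ks.length) := by
  intro ks
  induction ks with
  | nil => intro num p; simp [pvWsum]
  | cons k t ih =>
    intro num p
    simp only [List.foldl_cons, pvWsum, List.length_cons, ih]
    simp only [Prod.mk.injEq]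
    constructor <;> ring

lemma wsum_append_singleton (cs : List Char) : ∀ (xs : List Int) (k : Int),
    pvWsum cs (xs ++ [k]) = pvWsum cs xs + pvDigit cs k * 10 ^ xs.length := by
  intro xs
  induction xs with
  | nil => intro k; simp [pvWsum]
  | cons x t ih =>
    intro k
    simp only [List.cons_append, pvWsum, ih, List.length_cons]
    ring

-- Horner front-to-back = positional back-to-front
lemma horner_eq_wsum_reverse (cs : List Char) : ∀ (ks : List Int) (num : Int),
    ks.foldl (fun a k => a * 10 + pvDigit cs k) num =
      num * 10 ^ ks.length + pvWsum cs ks.reverse := by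
  intro ks
  induction ks with
  | nil => intro num; simp [pvWsum]
  | cons k t ih =>
    intro num
    simp only [List.foldl_cons, List.reverse_cons, List.length_cons, ih,
      wsum_append_singleton, List.length_reverse]
    ring

-- ===== VERDICT (by name: the statement is the Claim_ definition above) =====
theorem find_all_num_spec : Claim_equal_find_all_num := by
  intro s i _hDom _hPre
  unfold Spec_find_all_num
  set cs := s.toList with hcs
  set j := findAllNumEnd cs (2 * cs.length + 1) i with hj
  have hij : i ≤ j := findAllNumEnd_ge cs _ i
  have hA : find_all_num s i = findAllNumLoopA cs (2 * cs.length + 1) (pvDigit cs i) i := rfl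
  have hB : find_all_num_alt s i =
      (((PySem.List.pyRange j (i-1) (-1)).foldl
          (fun (st : Int × Int) k => (st.1 + pvDigit cs k * st.2, st.2 * 10)) (0, 1)).1, j) := rfl
  rw [hA, hB, loopA_eq cs (2 * cs.length + 1) i (pvDigit cs i), ← hj]
  have hrev : PySem.List.pyRange j (i-1) (-1) = (PySem.List.pyRange i (j+1) 1).reverse := by
    have := PySem.List.pyRange_neg_one_eq_reverse j (i-1)
    simpa using this
  rw [hrev, foldB_eq]
  have hcons : PySem.List.pyRange i (j+1) 1 = i :: PySem.List.pyRange (i+1) (j+1) 1 :=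
    PySem.List.pyRange_one_cons (by omega : i < j + 1)
  rw [hcons]
  simp only [List.reverse_cons, wsum_append_singleton, List.length_reverse,
    horner_eq_wsum_reverse]
  simp only [PySem.List.length_pyRange_one, Prod.mk.injEq]
  exact ⟨by ring, trivial⟩
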